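-- pv_equiv track=rewrite | github.com/pwang867/LeetCode-Solutions-Python | OA/Max Inserts to Obtain String Without 3 Consecutive 'a'.py | max_insert
-- ===== SOURCE A (Python) =====
-- def max_insert(s):
--     cnt = 0
--     left = -1
--     for right in range(len(s)):
--         if s[right] != 'a':
--             if right - left - 1 >= 3:
--                 return -1
--             else:
--                 cnt += 2 - (right-left-1)
--             left = right
--     tail = s[left+1:]
--     if len(tail) >= 3:
--         return -1
--     else:
--         return cnt + 2 - len(tail)
-- ===== SOURCE B (Python) =====
-- def max_insert(s):
--     # Group s into its maximal runs of 'a' (empty runs included) and fold over them.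
--     total = 0
--     for g in "".join(c if c == "a" else "|" for c in s).split("|"):
--         if len(g) >= 3:
--             return -1
--         total += 2 - len(g)
--     return total
-- ===== Notes on version B (the rewrite author's own statement) =====
-- stated objective: simpler
-- what changed: B replaces A's left-index tracking with separate tail handling by one grouping pass (split the string into its maximal 'a'-runs, empties included) followed by a uniform fold adding 2 - len(run) per run, -1 on any run of length >= 3.
import Mathlib
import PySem

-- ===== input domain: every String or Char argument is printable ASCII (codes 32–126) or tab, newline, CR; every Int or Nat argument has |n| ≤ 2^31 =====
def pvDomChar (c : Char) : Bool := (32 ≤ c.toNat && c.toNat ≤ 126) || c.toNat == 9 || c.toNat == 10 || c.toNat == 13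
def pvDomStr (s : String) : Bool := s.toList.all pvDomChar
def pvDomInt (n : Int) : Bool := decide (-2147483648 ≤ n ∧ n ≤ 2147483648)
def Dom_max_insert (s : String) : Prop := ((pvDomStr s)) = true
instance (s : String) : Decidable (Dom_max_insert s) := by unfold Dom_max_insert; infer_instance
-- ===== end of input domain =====

-- B replaces A's single loop with left-index state and special tail handling by an explicit
-- grouping into maximal 'a'-runs followed by a uniform fold (objective: simpler).

-- ===== PORT A =====
-- the for-loop of A: state cnt, left; right is the loop index
def maxInsertLoop (cs : List Char) (cnt : Int) (left : Int) (right : Nat) : Int :=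
  if h : right < cs.length then
    if cs[right] ≠ 'a' then
      if (right : Int) - left - 1 ≥ 3 then -1
      else maxInsertLoop cs (cnt + (2 - ((right : Int) - left - 1))) ((right : Int)) (right + 1)
    else maxInsertLoop cs cnt left (right + 1)
  else
    -- after the loop: tail = s[left+1:]
    let tail := PySem.List.slice cs (some (left + 1)) none
    if tail.length ≥ 3 then -1 else cnt + 2 - (tail.length : Int)
termination_by cs.length - right

def max_insert (s : String) : Int := maxInsertLoop s.toList 0 (-1) 0

-- ===== PORT B =====
-- Source B maps every non-'a' character to '|' ("".join(... for c in s))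
def mapBar (cs : List Char) : List Char := cs.map (fun c => if c = 'a' then c else '|')

-- exact hand port of Python str.split('|') for the single-character separator '|'
-- (keeps empty pieces, one piece per separator occurrence plus one)
def splitBar : List Char → List (List Char)
  | [] => [[]]
  | c :: t =>
    if c = '|' then [] :: splitBar t
    else match splitBar t with
      | [] => [[c]]          -- unreachable: splitBar never returns []
      | g :: gs => (c :: g) :: gs

-- the for-loop over the groups, with the early return -1
def bFold : List (List Char) → Int → Int
  | [], total => total
  | g :: gs, total => if (g.length : Int) ≥ 3 then -1 else bFold gs (total + (2 - (g.length : Int)))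

def max_insert_alt (s : String) : Int := bFold (splitBar (mapBar s.toList)) 0

-- ===== PRECONDITION & SPEC =====
def Spec_max_insert (s : String) (out : Int) : Prop := out = max_insert_alt s
instance (s : String) (out : Int) : Decidable (Spec_max_insert s out) := by unfold Spec_max_insert; infer_instance

-- ===== CLAIM (what is proved, stated in full; the proofs are below) =====
def Claim_equal_max_insert : Prop := ∀ (s : String), Dom_max_insert s → Spec_max_insert s (max_insert s)

-- ===== LEMMAS AND PROOFS =====

-- common recursive characterisation: process the rest of the string, `k` = length of the
-- current (unfinished) run of 'a's, `acc` = count so far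
def bCore : List Char → Int → Nat → Int
  | [], acc, k => if (k : Int) ≥ 3 then -1 else acc + (2 - (k : Int))
  | c :: t, acc, k =>
    if c = 'a' then bCore t acc (k + 1)
    else if (k : Int) ≥ 3 then -1 else bCore t (acc + (2 - (k : Int))) 0

theorem splitBar_ne_nil (l : List Char) : splitBar l ≠ [] := by
  cases l with
  | nil => simp [splitBar]
  | cons c t =>
    simp only [splitBar]
    split
    · simp
    · cases h : splitBar t <;> simp

theorem bFold_spec (l : List Char) : ∀ (acc : Int) (k : Nat) (g : List Char) (gs : List (List Char)),
    splitBar (mapBar l) = g :: gs →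
    bFold ((List.replicate k 'a' ++ g) :: gs) acc = bCore l acc k := by
  induction l with
  | nil =>
    intro acc k g gs h
    simp [splitBar, mapBar] at h
    obtain ⟨rfl, rfl⟩ := h
    simp [bFold, bCore]
  | cons c t ih =>
    intro acc k g gs h
    by_cases hc : c = 'a'
    · subst hc
      have hm : mapBar ('a' :: t) = 'a' :: mapBar t := by simp [mapBar]
      rw [hm] at h
      obtain ⟨g', gs', hsp⟩ := List.exists_cons_of_ne_nil (splitBar_ne_nil (mapBar t))
      simp only [splitBar, hsp, if_neg (by decide : ¬ ('a' = '|'))] at h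
      obtain ⟨rfl, rfl⟩ := h
      have hrep : List.replicate k 'a' ++ 'a' :: g' = List.replicate (k + 1) 'a' ++ g' := by
        simp [List.replicate_succ']
      rw [hrep, ih acc (k + 1) g' _ hsp]
      simp [bCore]
    · have hm : mapBar (c :: t) = '|' :: mapBar t := by simp [mapBar, hc]
      rw [hm] at h
      simp only [splitBar, if_pos] at h
      obtain ⟨rfl, rfl⟩ := h
      obtain ⟨g', gs', hsp⟩ := List.exists_cons_of_ne_nil (splitBar_ne_nil (mapBar t))
      simp only [bFold, bCore, if_neg hc, List.length_append, List.length_replicate,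
        List.length_nil, Nat.add_zero]
      split
      · rfl
      · have := ih (acc + (2 - (k : Int))) 0 g' gs' hsp
        simpa [hsp, bFold] using this
  
theorem loop_spec (cs : List Char) : ∀ (right k : Nat) (cnt : Int),
    right ≤ cs.length → k ≤ right →
    maxInsertLoop cs cnt ((right : Int) - k - 1) right = bCore (cs.drop right) cnt k := by
  intro right
  induction hfuel : cs.length - right using Nat.strong_induction_on generalizing right with
  | _ n ih =>
  intro k cnt hle hk
  rcases lt_or_eq_of_le hle with hlt | heq
  · rw [maxInsertLoop, dif_pos hlt]
    rw [List.drop_eq_getElem_cons hlt]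
    by_cases ha : cs[right] = 'a'
    · rw [if_neg (by simpa using ha)]
      have hih := ih (cs.length - (right + 1)) (by omega) (right + 1) rfl (k + 1) cnt (by omega) (by omega)
      have h1 : (((right + 1 : Nat) : Int)) - ((k + 1 : Nat) : Int) - 1 = (right : Int) - k - 1 := by
        push_cast; ring
      rw [h1] at hih
      rw [hih]
      simp [bCore, ha]
    · rw [if_pos (by simpa using ha)]
      have h2 : (right : Int) - ((right : Int) - k - 1) - 1 = (k : Int) := by ring
      rw [h2]
      simp only [bCore, if_neg ha]
      split
      · rfl
      · have hih := ih (cs.length - (right + 1)) (by omega) (right + 1) rfl 0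
          (cnt + (2 - (k : Int))) (by omega) (by omega)
        have h3 : (((right + 1 : Nat) : Int)) - ((0 : Nat) : Int) - 1 = (right : Int) := by
          push_cast; ring
        rw [h3] at hih
        rw [hih]
  · rw [maxInsertLoop, dif_neg (by omega)]
    have hge : cs.drop right = [] := by
      apply List.drop_eq_nil_of_le; omega
    have ha : (0 : Int) ≤ (right : Int) - k - 1 + 1 := by omega
    rw [hge]
    rw [PySem.List.slice_from cs ha]
    have htn : ((right : Int) - k - 1 + 1).toNat = right - k := by omega
    rw [htn]
    have hlen : (cs.drop (right - k)).length = k := by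
      simp [List.length_drop]; omega
    simp only [hlen]
    simp only [bCore]
    split
    · rw [if_pos (by omega)]
    · rw [if_neg (by omega)]; ring

-- ===== VERDICT (by name: the statement is the Claim_ definition above) =====
theorem max_insert_spec : Claim_equal_max_insert := by
  intro s _
  unfold Spec_max_insert max_insert max_insert_alt
  obtain ⟨g, gs, hsp⟩ := List.exists_cons_of_ne_nil (splitBar_ne_nil (mapBar s.toList))
  have hB := bFold_spec s.toList 0 0 g gs hsp
  have hA := loop_spec s.toList 0 0 0 (by omega) (by omega)
  simp only [List.drop_zero, Nat.cast_zero] at hA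
  rw [hsp]
  rw [show ((0 : Int) - 0 - 1) = -1 by ring] at hA
  rw [hA, ← hB]
  simp
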